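-- pv_equiv track=rewrite | github.com/khankhushi/Leetcode | Flip Bits - GFG/flip-bits.py | maxOnes
-- ===== SOURCE A (Python) =====
-- def maxOnes(a, n):
--     cnt = 0
--     for i in range(n):
--         if a[i]==1:
--             a[i] = -1
--             cnt += 1
--         else:
--             a[i] = 1
--
--     sm = 0
--     ans = 0
--     for j in range(n):
--         sm += a[j]
--         ans = max(sm,ans)
--
--         if sm<0:
--             sm = 0
--
--     return ans+cnt
-- ===== SOURCE B (Python) =====
-- def maxOnes(a, n):
--     # Single fused pass: transform a in place (same mutation as A) while running
--     # the prefix-sum / running-minimum formulation of max subarray sum.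
--     cnt = 0
--     sm = 0
--     mn = 0
--     ans = 0
--     for i in range(n):
--         if a[i] == 1:
--             a[i] = -1
--             cnt += 1
--         else:
--             a[i] = 1
--         sm += a[i]
--         if sm - mn > ans:
--             ans = sm - mn
--         if sm < mn:
--             mn = sm
--     return ans + cnt
-- ===== Notes on version B (the rewrite author's own statement) =====
-- stated objective: alternative
-- what changed: Replaces A's two passes (transform, then Kadane with reset-on-negative) by one fused pass using the prefix-sum/running-minimum formulation (ans = max over j of sm_j minus the minimum earlier prefix sum), preserving the in-place mutation of a.
import Mathlib
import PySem

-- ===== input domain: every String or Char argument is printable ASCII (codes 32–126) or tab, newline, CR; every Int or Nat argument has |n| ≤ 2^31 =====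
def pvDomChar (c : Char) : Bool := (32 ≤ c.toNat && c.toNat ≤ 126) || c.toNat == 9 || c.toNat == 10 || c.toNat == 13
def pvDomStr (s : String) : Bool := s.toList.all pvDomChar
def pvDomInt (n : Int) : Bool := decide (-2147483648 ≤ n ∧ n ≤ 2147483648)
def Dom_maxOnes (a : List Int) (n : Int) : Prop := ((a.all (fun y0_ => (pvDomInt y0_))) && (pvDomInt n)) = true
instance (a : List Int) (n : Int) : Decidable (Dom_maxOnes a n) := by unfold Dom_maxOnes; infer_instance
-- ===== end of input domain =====

-- B fuses A's two passes into one and replaces Kadane's reset-on-negative accumulator by the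
-- prefix-sum/running-minimum formulation; same return value, and B's Python performs the same
-- in-place mutation of a as A's.

-- ===== PORT A =====
def maxOnes (a : List Int) (n : Int) : Int :=
  let p := (PySem.List.pyRange 0 n 1).foldl
    (fun (s : List Int × Int) i =>
      if PySem.List.pyGetD s.1 i 0 = 1 then (PySem.List.pySetD s.1 i (-1), s.2 + 1)
      else (PySem.List.pySetD s.1 i 1, s.2)) (a, 0)
  let q := (PySem.List.pyRange 0 n 1).foldl
    (fun (s : Int × Int) j =>
      let sm := s.1 + PySem.List.pyGetD p.1 j 0
      let ans := max sm s.2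
      (if sm < 0 then 0 else sm, ans)) ((0 : Int), (0 : Int))
  q.2 + p.2

-- ===== PORT B =====
def maxOnes_alt (a : List Int) (n : Int) : Int :=
  let s := (PySem.List.pyRange 0 n 1).foldl
    (fun (s : List Int × Int × Int × Int × Int) i =>
      let t := if PySem.List.pyGetD s.1 i 0 = 1 then (PySem.List.pySetD s.1 i (-1), s.2.1 + 1)
               else (PySem.List.pySetD s.1 i 1, s.2.1)
      let sm := s.2.2.1 + PySem.List.pyGetD t.1 i 0
      let ans := if sm - s.2.2.2.1 > s.2.2.2.2 then sm - s.2.2.2.1 else s.2.2.2.2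
      let mn := if sm < s.2.2.2.1 then sm else s.2.2.2.1
      (t.1, t.2, sm, mn, ans)) (a, 0, 0, 0, 0)
  s.2.2.2.2 + s.2.1

-- ===== PRECONDITION & SPEC =====
-- Python A raises IndexError when n > len(a); both programs are claimed only for n ≤ len(a).
def Pre_maxOnes (a : List Int) (n : Int) : Prop := n ≤ (a.length : Int)
instance (a : List Int) (n : Int) : Decidable (Pre_maxOnes a n) := by unfold Pre_maxOnes; infer_instance
def pvWitness_maxOnes : List Int × Int := ([1, 0, 0, 1, 1], 5)

def Spec_maxOnes (a : List Int) (n : Int) (out : Int) : Prop := out = maxOnes_alt a n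
instance (a : List Int) (n : Int) (out : Int) : Decidable (Spec_maxOnes a n out) := by unfold Spec_maxOnes; infer_instance

-- ===== CLAIM (what is proved, stated in full; the proofs are below) =====
def Claim_equal_maxOnes : Prop := ∀ (a : List Int) (n : Int), Dom_maxOnes a n → Pre_maxOnes a n → Spec_maxOnes a n (maxOnes a n)

-- ===== LEMMAS AND PROOFS =====

-- proof-only names for the fold bodies (definitionally equal to the lambdas in the ports)
def pvF1 : List Int × Int → Int → List Int × Int := fun s i =>
  if PySem.List.pyGetD s.1 i 0 = 1 then (PySem.List.pySetD s.1 i (-1), s.2 + 1)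
  else (PySem.List.pySetD s.1 i 1, s.2)

def pvF2 (c : List Int) : Int × Int → Int → Int × Int := fun s j =>
  let sm := s.1 + PySem.List.pyGetD c j 0
  let ans := max sm s.2
  (if sm < 0 then 0 else sm, ans)

def pvG : List Int × Int × Int × Int × Int → Int → List Int × Int × Int × Int × Int := fun s i =>
  let t := if PySem.List.pyGetD s.1 i 0 = 1 then (PySem.List.pySetD s.1 i (-1), s.2.1 + 1)
           else (PySem.List.pySetD s.1 i 1, s.2.1)
  let sm := s.2.2.1 + PySem.List.pyGetD t.1 i 0
  let ans := if sm - s.2.2.2.1 > s.2.2.2.2 then sm - s.2.2.2.1 else s.2.2.2.2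
  let mn := if sm < s.2.2.2.1 then sm else s.2.2.2.1
  (t.1, t.2, sm, mn, ans)

def pvTr (x : Int) : Int := if x = 1 then -1 else 1

def pvMix (a : List Int) (m : Nat) : List Int := (a.take m).map pvTr ++ a.drop m

lemma maxOnes_as_folds (a : List Int) (n : Int) :
    maxOnes a n =
      ((PySem.List.pyRange 0 n 1).foldl
        (pvF2 ((PySem.List.pyRange 0 n 1).foldl pvF1 (a, 0)).1) (0, 0)).2 +
      ((PySem.List.pyRange 0 n 1).foldl pvF1 (a, 0)).2 := rfl

lemma maxOnes_alt_as_fold (a : List Int) (n : Int) :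
    maxOnes_alt a n =
      ((PySem.List.pyRange 0 n 1).foldl pvG (a, 0, 0, 0, 0)).2.2.2.2 +
      ((PySem.List.pyRange 0 n 1).foldl pvG (a, 0, 0, 0, 0)).2.1 := rfl

lemma pvG_eq (l : List Int) (c sm mn ans i : Int) :
    pvG (l, c, sm, mn, ans) i =
      ((pvF1 (l, c) i).1, (pvF1 (l, c) i).2,
       sm + PySem.List.pyGetD (pvF1 (l, c) i).1 i 0,
       if sm + PySem.List.pyGetD (pvF1 (l, c) i).1 i 0 < mn
         then sm + PySem.List.pyGetD (pvF1 (l, c) i).1 i 0 else mn,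
       if sm + PySem.List.pyGetD (pvF1 (l, c) i).1 i 0 - mn > ans
         then sm + PySem.List.pyGetD (pvF1 (l, c) i).1 i 0 - mn else ans) := rfl

lemma pvRange_toNat (n : Int) : PySem.List.pyRange 0 n 1 = PySem.List.pyRange 0 ((n.toNat : Int)) 1 := by
  rcases le_or_gt n 0 with h | h
  · rw [PySem.List.pyRange_one_eq_nil h, PySem.List.pyRange_one_eq_nil (by omega)]
  · congr 1; omega

lemma pvMix_getD_ge (a : List Int) (m j : Nat) (hj : m ≤ j) (hm : m ≤ a.length) :
    (pvMix a m).getD j 0 = a.getD j 0 := by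
  unfold pvMix
  rw [List.getD_eq_getElem?_getD, List.getD_eq_getElem?_getD,
    List.getElem?_append_right (by simp; omega)]
  simp only [List.getElem?_drop]
  congr 2
  simp
  omega

lemma pvMix_getD_lt (a : List Int) (m j : Nat) (hj : j < m) (hm : m ≤ a.length) :
    (pvMix a m).getD j 0 = pvTr (a.getD j 0) := by
  unfold pvMix
  have hjl : j < a.length := by omega
  rw [List.getD_eq_getElem?_getD, List.getElem?_append_left (by simp; omega),
    List.getElem?_map, List.getElem?_take_of_lt hj, List.getElem?_eq_getElem hjl]
  simp [List.getD_eq_getElem?_getD, List.getElem?_eq_getElem hjl]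

lemma pvMix_set (a : List Int) (m : Nat) (hm : m < a.length) :
    (pvMix a m).set m (pvTr (a.getD m 0)) = pvMix a (m + 1) := by
  unfold pvMix
  have hdrop : a.drop m = a[m] :: a.drop (m + 1) := List.drop_eq_getElem_cons hm
  have htake : a.take (m + 1) = a.take m ++ [a[m]] := by
    rw [List.take_add_one, List.getElem?_eq_getElem hm]; rfl
  have hlen : ((a.take m).map pvTr).length = m := by simp; omega
  conv_lhs => rw [hdrop]
  conv_rhs => rw [htake]
  rw [List.map_append, List.set_append_right _ _ (by rw [hlen]), hlen, Nat.sub_self,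
    List.set_cons_zero]
  simp [List.getD_eq_getElem?_getD, List.getElem?_eq_getElem hm]

-- the coupled invariant after processing indices [0, m): A's first fold has transformed the first m
-- entries; B's fused fold carries the same list and count, its answer equals A's second fold's
-- answer, and A's clamped running sum equals B's sm - mn.
lemma pvInv (a : List Int) (N : Nat) (hN : N ≤ a.length) (m : Nat) (hm : m ≤ N) :
    ((PySem.List.pyRange 0 (m : Int) 1).foldl pvF1 (a, 0)).1 = pvMix a m ∧
    ∃ sm mn,
      (PySem.List.pyRange 0 (m : Int) 1).foldl pvG (a, 0, 0, 0, 0) =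
        (((PySem.List.pyRange 0 (m : Int) 1).foldl pvF1 (a, 0)).1,
         ((PySem.List.pyRange 0 (m : Int) 1).foldl pvF1 (a, 0)).2, sm, mn,
         ((PySem.List.pyRange 0 (m : Int) 1).foldl (pvF2 (pvMix a N)) (0, 0)).2) ∧
      ((PySem.List.pyRange 0 (m : Int) 1).foldl (pvF2 (pvMix a N)) (0, 0)).1 = sm - mn := by
  induction m with
  | zero =>
    rw [show ((0 : Nat) : Int) = 0 by rfl, PySem.List.pyRange_one_eq_nil (by omega)]
    exact ⟨by simp [pvMix], 0, 0, by simp, by simp⟩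
  | succ m ih =>
    obtain ⟨h1, sm, mn, hG, hq⟩ := ih (by omega)
    have hmlen : m < a.length := by omega
    have hsplit : PySem.List.pyRange 0 ((m : Int) + 1) 1 =
        PySem.List.pyRange 0 (m : Int) 1 ++ [(m : Int)] :=
      PySem.List.pyRange_one_succ_right (by omega)
    have hcast : ((m + 1 : Nat) : Int) = (m : Int) + 1 := by push_cast; ring
    set P := (PySem.List.pyRange 0 (m : Int) 1).foldl pvF1 (a, 0) with hP
    set Q := (PySem.List.pyRange 0 (m : Int) 1).foldl (pvF2 (pvMix a N)) (0, 0) with hQi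
    -- the one step of A's first loop at index m
    have hreadP : PySem.List.pyGetD P.1 (m : Int) 0 = a.getD m 0 := by
      rw [h1, PySem.List.pyGetD_natCast, pvMix_getD_ge a m m le_rfl (by omega)]
    have hstep1 : pvF1 P (m : Int) = (pvMix a (m + 1), P.2 + (if a.getD m 0 = 1 then 1 else 0)) := by
      unfold pvF1
      rw [hreadP]
      by_cases hcase : a.getD m 0 = 1
      · have htr : pvTr (a.getD m 0) = -1 := by unfold pvTr; rw [if_pos hcase]
        rw [if_pos hcase, if_pos hcase]
        refine Prod.ext ?_ rfl
        rw [PySem.List.pySetD_natCast, h1,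
          show (-1 : Int) = pvTr (a.getD m 0) from htr.symm]
        exact pvMix_set a m hmlen
      · have htr : pvTr (a.getD m 0) = 1 := by unfold pvTr; rw [if_neg hcase]
        rw [if_neg hcase, if_neg hcase]
        refine Prod.ext ?_ (by omega)
        rw [PySem.List.pySetD_natCast, h1,
          show (1 : Int) = pvTr (a.getD m 0) from htr.symm]
        exact pvMix_set a m hmlen
    -- the value read at index m from the (partially or fully) transformed list
    have hv : PySem.List.pyGetD (pvMix a (m + 1)) (m : Int) 0 = pvTr (a.getD m 0) := by
      rw [PySem.List.pyGetD_natCast]; exact pvMix_getD_lt a (m + 1) m (by omega) (by omega)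
    have hvN : PySem.List.pyGetD (pvMix a N) (m : Int) 0 = pvTr (a.getD m 0) := by
      rw [PySem.List.pyGetD_natCast]; exact pvMix_getD_lt a N m (by omega) hN
    have hstep2 : pvF2 (pvMix a N) Q (m : Int) =
        (if Q.1 + pvTr (a.getD m 0) < 0 then 0 else Q.1 + pvTr (a.getD m 0),
         max (Q.1 + pvTr (a.getD m 0)) Q.2) := by
      unfold pvF2; rw [hvN]
    have hstepG : pvG (P.1, P.2, sm, mn, Q.2) (m : Int) =
        (pvMix a (m + 1), P.2 + (if a.getD m 0 = 1 then 1 else 0),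
         sm + pvTr (a.getD m 0),
         if sm + pvTr (a.getD m 0) < mn then sm + pvTr (a.getD m 0) else mn,
         if sm + pvTr (a.getD m 0) - mn > Q.2 then sm + pvTr (a.getD m 0) - mn else Q.2) := by
      rw [pvG_eq, Prod.mk.eta, hstep1, hv]
    refine ⟨?_, sm + pvTr (a.getD m 0),
      (if sm + pvTr (a.getD m 0) < mn then sm + pvTr (a.getD m 0) else mn), ?_, ?_⟩
    · rw [hcast, hsplit, List.foldl_append]
      simp only [List.foldl_cons, List.foldl_nil, ← hP, hstep1]
    · rw [hcast, hsplit, List.foldl_append, List.foldl_append, List.foldl_append]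
      simp only [List.foldl_cons, List.foldl_nil, ← hP, ← hQi, hG, hstepG, hstep1, hstep2]
      refine Prod.ext rfl (Prod.ext rfl (Prod.ext rfl (Prod.ext rfl ?_)))
      show (if sm + pvTr (a.getD m 0) - mn > Q.2 then sm + pvTr (a.getD m 0) - mn else Q.2) =
        max (Q.1 + pvTr (a.getD m 0)) Q.2
      rw [hq, Int.max_def]
      split_ifs <;> omega
    · rw [hcast, hsplit, List.foldl_append]
      simp only [List.foldl_cons, List.foldl_nil, ← hQi, hstep2]
      show (if Q.1 + pvTr (a.getD m 0) < 0 then 0 else Q.1 + pvTr (a.getD m 0)) =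
        sm + pvTr (a.getD m 0) - if sm + pvTr (a.getD m 0) < mn then sm + pvTr (a.getD m 0) else mn
      rw [hq]
      split_ifs <;> omega

-- ===== VERDICT (by name: the statement is the Claim_ definition above) =====
theorem maxOnes_spec : Claim_equal_maxOnes := by
  intro a n _ hpre
  unfold Spec_maxOnes
  rw [maxOnes_as_folds, maxOnes_alt_as_fold, pvRange_toNat]
  have hN : n.toNat ≤ a.length := by
    unfold Pre_maxOnes at hpre; omega
  obtain ⟨h1, sm, mn, hG, -⟩ := pvInv a n.toNat hN n.toNat le_rfl
  rw [h1, hG]
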